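-- pv_equiv track=rewrite | github.com/hbazille/project_euler | 684.py | fibo_smallest
-- ===== SOURCE A (Python) =====
-- def smallest(n):
--     m = (n + 1) // 9 - 1
--     mbis = n // 9
--     mod = n % 9
--     r = 0
--     if mod != 8:
--         k = n - mod
--         a = 0
--         while k <= n:
--             r += a * pow(10, mbis, 1000000007) + pow(10, mbis, 1000000007) - 1
--             k += 1
--             a += 1
--     return (5 * pow(10, m + 1, 1000000007) - 5 - 9 * (m + 1) + r) % 1000000007
--
-- def fibo_smallest(n):
--     f, fi = 0, 1
--     i = 1
--     r = 0
--     while i < n: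
--         f, fi = fi, fi + f
--         i += 1
--         r += smallest(fi)
--     return r % 1000000007
-- ===== SOURCE B (Python) =====
-- def fibo_smallest(n):
--     # O(1)-size state per step: track each Fibonacci number F only through
--     # F % 9, (F // 9) % p and pow(10, F // 9, p), updated via the carry of
--     # the base-9 addition; each smallest(F) is then a closed form (no bignums,
--     # no inner loop, no pow calls).
--     p = 1000000007
--     f9, fi9 = 0, 1      # f % 9, fi % 9
--     fq, fiq = 0, 0      # (f // 9) % p, (fi // 9) % p
--     fx, fix = 1, 1      # pow(10, f // 9, p), pow(10, fi // 9, p)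
--     i = 1
--     r = 0
--     while i < n:
--         carry = 1 if f9 + fi9 >= 9 else 0
--         f9, fi9 = fi9, (fi9 + f9) % 9
--         fq, fiq = fiq, (fiq + fq + carry) % p
--         fx, fix = fix, fix * fx * (10 if carry == 1 else 1) % p
--         i += 1
--         # smallest(fi) in closed form
--         if fi9 == 8:
--             x = fix * 10 % p
--             q1 = (fiq + 1) % p
--             rr = 0
--         else:
--             x = fix
--             q1 = fiq
--             rr = fix * ((fi9 * (fi9 + 1)) // 2 + fi9 + 1) - (fi9 + 1)
--         r += (5 * x - 5 - 9 * q1 + rr) % p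
--     return r % p
-- ===== Notes on version B (the rewrite author's own statement) =====
-- stated objective: faster
-- what changed: Instead of carrying exact (exponentially large) Fibonacci bignums and calling modular pow and an inner digit loop per step, B tracks each Fibonacci number only through F%9, (F//9)%p and 10^(F//9) mod p, updated in O(1) via the base-9 addition carry, and evaluates smallest(F) by a closed form.
import Mathlib
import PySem

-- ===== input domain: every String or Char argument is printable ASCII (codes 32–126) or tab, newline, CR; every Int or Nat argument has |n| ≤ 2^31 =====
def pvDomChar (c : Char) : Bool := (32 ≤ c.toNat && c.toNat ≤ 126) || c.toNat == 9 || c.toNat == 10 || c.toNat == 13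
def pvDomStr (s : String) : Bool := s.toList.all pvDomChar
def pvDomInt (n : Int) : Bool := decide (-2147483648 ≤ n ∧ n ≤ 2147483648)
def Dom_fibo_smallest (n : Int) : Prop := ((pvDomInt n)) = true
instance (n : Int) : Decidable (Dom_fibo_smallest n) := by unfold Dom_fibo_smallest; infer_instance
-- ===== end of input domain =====

-- B replaces A's exact bignum Fibonacci state and per-step modular pows / inner digit loop
-- by O(1) modular state (F%9, (F//9)%p, 10^(F//9) mod p) updated via the base-9 carry; faster (asymptotic).

-- ===== PORT A =====
def pvP : Int := 1000000007

-- Python's three-argument pow(b, e, m): binary modular exponentiation (m > 0 here)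
def pvPowMod (b : Int) (e : ℕ) (m : Int) : Int :=
  if e = 0 then PySem.Int.mod 1 m
  else
    let h := pvPowMod (PySem.Int.mod (b * b) m) (e / 2) m
    if e % 2 = 1 then PySem.Int.mod (h * b) m else h
termination_by e
decreasing_by omega

-- inner 'while k <= n' of smallest (r accumulates a*pow(10,mbis,p)+pow(10,mbis,p)-1)
def pvASmallLoop (n k a r mbis : Int) : Int :=
  if k ≤ n then
    pvASmallLoop n (k + 1) (a + 1)
      (r + a * pvPowMod 10 mbis.toNat pvP + pvPowMod 10 mbis.toNat pvP - 1) mbis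
  else r
termination_by (n + 1 - k).toNat
decreasing_by omega

def pvASmallest (n : Int) : Int :=
  let m := PySem.Int.floordiv (n + 1) 9 - 1
  let mbis := PySem.Int.floordiv n 9
  let md := PySem.Int.mod n 9
  let r := if md ≠ 8 then pvASmallLoop n (n - md) 0 0 mbis else 0
  PySem.Int.mod (5 * pvPowMod 10 (m + 1).toNat pvP - 5 - 9 * (m + 1) + r) pvP

def pvALoop (n f fi i r : Int) : Int :=
  if i < n then pvALoop n fi (fi + f) (i + 1) (r + pvASmallest (fi + f)) else r
termination_by (n - i).toNat
decreasing_by omega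

def fibo_smallest (n : Int) : Int := PySem.Int.mod (pvALoop n 0 1 1 0) pvP

-- ===== PORT B =====
-- smallest(fi) in closed form from fi%9, (fi//9)%p, 10^(fi//9) mod p
def pvBSmall (fi9 fiq fix : Int) : Int :=
  let xqr : Int × Int × Int :=
    if fi9 = 8 then
      (PySem.Int.mod (fix * 10) pvP, PySem.Int.mod (fiq + 1) pvP, 0)
    else
      (fix, fiq, fix * (PySem.Int.floordiv (fi9 * (fi9 + 1)) 2 + fi9 + 1) - (fi9 + 1))
  PySem.Int.mod (5 * xqr.1 - 5 - 9 * xqr.2.1 + xqr.2.2) pvP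

def pvBLoop (n f9 fi9 fq fiq fx fix i r : Int) : Int :=
  if i < n then
    let carry : Int := if f9 + fi9 ≥ 9 then 1 else 0
    let fi9' := PySem.Int.mod (fi9 + f9) 9
    let fiq' := PySem.Int.mod (fiq + fq + carry) pvP
    let fix' := PySem.Int.mod (fix * fx * (if carry = 1 then 10 else 1)) pvP
    pvBLoop n fi9 fi9' fiq fiq' fix fix' (i + 1) (r + pvBSmall fi9' fiq' fix')
  else r
termination_by (n - i).toNat
decreasing_by omega

def fibo_smallest_alt (n : Int) : Int := PySem.Int.mod (pvBLoop n 0 1 0 0 1 1 1 0) pvP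

-- ===== PRECONDITION & SPEC =====
def Spec_fibo_smallest (n : Int) (out : Int) : Prop := out = fibo_smallest_alt n
instance (n : Int) (out : Int) : Decidable (Spec_fibo_smallest n out) := by unfold Spec_fibo_smallest; infer_instance

-- ===== CLAIM (what is proved, stated in full; the proofs are below) =====
def Claim_equal_fibo_smallest : Prop := ∀ (n : Int), Dom_fibo_smallest n → Spec_fibo_smallest n (fibo_smallest n)

-- ===== LEMMAS AND PROOFS =====

-- triangular numbers 0+1+…+(c-1), used to state A's inner loop in closed form
def pvTri : ℕ → Int
  | 0 => 0
  | c + 1 => pvTri c + c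

lemma pvPowMod_eq (b : Int) (m : Int) (hm : 0 < m) : ∀ e : ℕ, pvPowMod b e m = b ^ e % m := by
  intro e
  induction e using Nat.strong_induction_on generalizing b with
  | _ e ih =>
    rw [pvPowMod]
    have hmod : ∀ a : Int, PySem.Int.mod a m = a % m :=
      fun a => PySem.Int.mod_eq_emod_of_pos hm
    by_cases h0 : e = 0
    · rw [if_pos h0, h0, hmod, pow_zero]
    · rw [if_neg h0]
      have hrec : pvPowMod (PySem.Int.mod (b * b) m) (e / 2) m = b ^ (2 * (e / 2)) % m := by
        rw [ih (e / 2) (by omega), hmod, pow_mul, pow_two]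
        exact Int.ModEq.pow (e / 2) (Int.emod_emod_of_dvd _ dvd_rfl)
      by_cases hodd : e % 2 = 1
      · rw [if_pos hodd, hrec, hmod, Int.mul_emod, Int.emod_emod_of_dvd _ dvd_rfl,
          ← Int.mul_emod, ← pow_succ, show 2 * (e / 2) + 1 = e from by omega]
      · rw [if_neg hodd, hrec, show 2 * (e / 2) = e from by omega]

lemma pvASmallLoop_closed (mbis : Int) :
    ∀ (c : ℕ) (n k a r : Int), (c : Int) = n + 1 - k →
      pvASmallLoop n k a r mbis =
        r + c * (a * pvPowMod 10 mbis.toNat pvP + pvPowMod 10 mbis.toNat pvP - 1)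
          + pvTri c * pvPowMod 10 mbis.toNat pvP := by
  intro c
  induction c with
  | zero =>
    intro n k a r hc
    rw [pvASmallLoop]
    rw [if_neg (by omega)]
    simp [pvTri]
  | succ c ih =>
    intro n k a r hc
    rw [pvASmallLoop]
    rw [if_pos (by omega)]
    rw [ih n (k + 1) (a + 1) _ (by push_cast at hc ⊢; omega)]
    simp only [pvTri]
    push_cast
    ring

lemma pv_smallest_eq (G : ℕ) :
    pvASmallest (G : Int) =
      pvBSmall ((G % 9 : ℕ) : Int) ((G / 9 % 1000000007 : ℕ) : Int)
        ((10 ^ (G / 9) % 1000000007 : ℕ) : Int) := by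
  have hPpos : (0 : Int) < pvP := by norm_num [pvP]
  have hmodP : ∀ a : Int, PySem.Int.mod a pvP = a % pvP :=
    fun a => PySem.Int.mod_eq_emod_of_pos hPpos
  have hmod : PySem.Int.mod (G : Int) 9 = ((G % 9 : ℕ) : Int) := by
    exact_mod_cast PySem.Int.mod_natCast G 9
  have hdiv : PySem.Int.floordiv (G : Int) 9 = ((G / 9 : ℕ) : Int) := by
    exact_mod_cast PySem.Int.floordiv_natCast G 9
  have hdiv1 : PySem.Int.floordiv ((G : Int) + 1) 9 = (((G + 1) / 9 : ℕ) : Int) := by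
    have := PySem.Int.floordiv_natCast (G + 1) 9
    push_cast at this ⊢
    exact this
  have hpow : ∀ e : ℕ, pvPowMod 10 e pvP = ((10 ^ e % 1000000007 : ℕ) : Int) := by
    intro e
    rw [pvPowMod_eq 10 pvP hPpos e]
    have h10 : ((10 : Int) ^ e) = ((10 ^ e : ℕ) : Int) := by push_cast; ring
    rw [h10, pvP]
    exact_mod_cast (Int.natCast_mod (10 ^ e) 1000000007).symm
  have hmodeq : ∀ m : ℕ, ((m : ℕ) : Int) ≡ ((m % 1000000007 : ℕ) : Int) [ZMOD pvP] := by
    intro m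
    have hc : ((m % 1000000007 : ℕ) : Int) = (m : Int) % pvP := by
      rw [pvP]; exact_mod_cast Int.natCast_mod m 1000000007
    rw [hc]
    exact (Int.emod_emod_of_dvd _ dvd_rfl).symm
  simp only [pvASmallest, pvBSmall]
  rw [hdiv1, hdiv, hmod]
  have hcancel : ((((G + 1) / 9 : ℕ) : Int) - 1 + 1) = (((G + 1) / 9 : ℕ) : Int) := by ring
  rw [hcancel, Int.toNat_natCast]
  by_cases h8 : G % 9 = 8
  · -- mod == 8 : A skips the inner loop; (G+1)/9 = G/9 + 1
    have hq : (G + 1) / 9 = G / 9 + 1 := by omega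
    rw [if_neg (by simp [h8]), if_pos (show ((G % 9 : ℕ) : Int) = 8 by rw [h8]; norm_num)]
    simp only [hpow, hq]
    have hx : PySem.Int.mod (((10 ^ (G / 9) % 1000000007 : ℕ) : Int) * 10) pvP
        = ((10 ^ (G / 9 + 1) % 1000000007 : ℕ) : Int) := by
      rw [hmodP]
      have h1 : ((10 ^ (G / 9) % 1000000007 : ℕ) : Int) * 10
          = ((10 ^ (G / 9) % 1000000007 * 10 : ℕ) : Int) := by push_cast; ring
      have h2 : ((10 ^ (G / 9) % 1000000007 * 10 : ℕ) : Int) % pvP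
          = ((10 ^ (G / 9) % 1000000007 * 10 % 1000000007 : ℕ) : Int) := by
        rw [pvP]; exact_mod_cast (Int.natCast_mod (10 ^ (G / 9) % 1000000007 * 10) 1000000007).symm
      have h3 : 10 ^ (G / 9) % 1000000007 * 10 % 1000000007 = 10 ^ (G / 9 + 1) % 1000000007 := by
        rw [pow_succ]
        exact (Nat.mod_modEq _ _).mul_right 10
      rw [h1, h2, h3]
    rw [hx]
    rw [hmodP, hmodP]
    apply Int.ModEq.add_right
    refine Int.ModEq.sub (Int.ModEq.refl _) (Int.ModEq.mul_left 9 ?_)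
    rw [hmodP]
    calc ((G / 9 + 1 : ℕ) : Int) = ((G / 9 : ℕ) : Int) + 1 := by push_cast; ring
      _ ≡ ((G / 9 % 1000000007 : ℕ) : Int) + 1 [ZMOD pvP] := (hmodeq _).add_right 1
      _ ≡ (((G / 9 % 1000000007 : ℕ) : Int) + 1) % pvP [ZMOD pvP] :=
          (Int.emod_emod_of_dvd _ dvd_rfl).symm
  · -- mod ≠ 8 : inner loop runs G%9+1 times; (G+1)/9 = G/9
    have hq : (G + 1) / 9 = G / 9 := by omega
    have hne : ((G % 9 : ℕ) : Int) ≠ 8 := fun h => h8 (by exact_mod_cast h)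
    rw [if_pos hne, if_neg hne]
    rw [pvASmallLoop_closed _ (G % 9 + 1) _ _ _ _ (by push_cast; omega)]
    simp only [hq, hpow, Int.toNat_natCast]
    have hs : G % 9 < 9 := Nat.mod_lt _ (by norm_num)
    have hfd : PySem.Int.floordiv (((G % 9 : ℕ) : Int) * (((G % 9 : ℕ) : Int) + 1)) 2
        = ((G % 9 * (G % 9 + 1) / 2 : ℕ) : Int) := by
      have := PySem.Int.floordiv_natCast (G % 9 * (G % 9 + 1)) 2
      push_cast at this ⊢
      exact this
    have htri : pvTri (G % 9 + 1) = ((G % 9 * (G % 9 + 1) / 2 : ℕ) : Int) := by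
      interval_cases h : G % 9 <;> rfl
    have hgen : ∀ T : Int,
        (0 : Int) + ((G % 9 + 1 : ℕ) : Int) * (0 * T + T - 1) + pvTri (G % 9 + 1) * T
          = T * (PySem.Int.floordiv (((G % 9 : ℕ) : Int) * (((G % 9 : ℕ) : Int) + 1)) 2
              + ((G % 9 : ℕ) : Int) + 1) - (((G % 9 : ℕ) : Int) + 1) := by
      intro T
      rw [hfd, htri]
      push_cast
      ring
    rw [hmodP, hmodP]
    refine Int.ModEq.add (Int.ModEq.sub (Int.ModEq.refl _) (Int.ModEq.mul_left 9 (hmodeq _))) ?_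
    rw [hgen]

lemma pv_loop_eq :
    ∀ (c : ℕ) (n i r : Int) (F Fi : ℕ), n - i ≤ (c : Int) →
      pvALoop n (F : Int) (Fi : Int) i r =
        pvBLoop n ((F % 9 : ℕ) : Int) ((Fi % 9 : ℕ) : Int)
          ((F / 9 % 1000000007 : ℕ) : Int) ((Fi / 9 % 1000000007 : ℕ) : Int)
          ((10 ^ (F / 9) % 1000000007 : ℕ) : Int) ((10 ^ (Fi / 9) % 1000000007 : ℕ) : Int) i r := by
  intro c
  induction c with
  | zero =>
    intro n i r F Fi h
    rw [pvALoop, pvBLoop, if_neg (by omega), if_neg (by omega)]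
  | succ c ih =>
    intro n i r F Fi h
    by_cases hin : i < n
    · rw [pvALoop, pvBLoop, if_pos hin, if_pos hin]
      have hPpos : (0 : Int) < pvP := by norm_num [pvP]
      have hmodP : ∀ a : Int, PySem.Int.mod a pvP = a % pvP :=
        fun a => PySem.Int.mod_eq_emod_of_pos hPpos
      -- the base-9 carry
      set cb : ℕ := if F % 9 + Fi % 9 ≥ 9 then 1 else 0 with hcb
      have hcarry : (if ((F % 9 : ℕ) : Int) + ((Fi % 9 : ℕ) : Int) ≥ 9 then (1 : Int) else 0)
          = (cb : ℕ) := by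
        rw [hcb]; split_ifs with h1 h2 h2 <;> simp_all <;> omega
      have hdivsum : (F + Fi) / 9 = F / 9 + Fi / 9 + cb := by
        rw [hcb]; split_ifs <;> omega
      -- new fi % 9
      have h9 : PySem.Int.mod (((Fi % 9 : ℕ) : Int) + ((F % 9 : ℕ) : Int)) 9
          = (((F + Fi) % 9 : ℕ) : Int) := by
        have hc : ((Fi % 9 : ℕ) : Int) + ((F % 9 : ℕ) : Int) = ((Fi % 9 + F % 9 : ℕ) : Int) := by
          push_cast; ring
        rw [hc]
        have := PySem.Int.mod_natCast (Fi % 9 + F % 9) 9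
        have he : (Fi % 9 + F % 9) % 9 = (F + Fi) % 9 := by omega
        rw [← he]
        exact_mod_cast this
      -- new (fi // 9) % p
      have hqn : PySem.Int.mod (((Fi / 9 % 1000000007 : ℕ) : Int) + ((F / 9 % 1000000007 : ℕ) : Int)
            + ((cb : ℕ) : Int)) pvP = (((F + Fi) / 9 % 1000000007 : ℕ) : Int) := by
        have hc : ((Fi / 9 % 1000000007 : ℕ) : Int) + ((F / 9 % 1000000007 : ℕ) : Int) + ((cb : ℕ) : Int)
            = ((Fi / 9 % 1000000007 + F / 9 % 1000000007 + cb : ℕ) : Int) := by push_cast; ring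
        rw [hc, pvP]
        have hn : (Fi / 9 % 1000000007 + F / 9 % 1000000007 + cb) % 1000000007
            = (F + Fi) / 9 % 1000000007 := by
          rw [hdivsum]; omega
        rw [← hn]
        exact_mod_cast PySem.Int.mod_natCast (Fi / 9 % 1000000007 + F / 9 % 1000000007 + cb) 1000000007
      -- new 10^(fi // 9) mod p
      have hxn : PySem.Int.mod (((10 ^ (Fi / 9) % 1000000007 : ℕ) : Int)
            * ((10 ^ (F / 9) % 1000000007 : ℕ) : Int)
            * (if ((cb : ℕ) : Int) = 1 then (10 : Int) else 1)) pvP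
          = ((10 ^ ((F + Fi) / 9) % 1000000007 : ℕ) : Int) := by
        have hifc : (if ((cb : ℕ) : Int) = 1 then (10 : Int) else 1) = ((10 ^ cb : ℕ) : Int) := by
          rw [hcb]; split_ifs with h1 h2 h2 <;> simp_all
        rw [hifc]
        have hc : ((10 ^ (Fi / 9) % 1000000007 : ℕ) : Int) * ((10 ^ (F / 9) % 1000000007 : ℕ) : Int)
              * ((10 ^ cb : ℕ) : Int)
            = ((10 ^ (Fi / 9) % 1000000007 * (10 ^ (F / 9) % 1000000007) * 10 ^ cb : ℕ) : Int) := by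
          push_cast; ring
        rw [hc, pvP]
        have hn : (10 ^ (Fi / 9) % 1000000007 * (10 ^ (F / 9) % 1000000007) * 10 ^ cb) % 1000000007
            = 10 ^ ((F + Fi) / 9) % 1000000007 := by
          rw [hdivsum, show F / 9 + Fi / 9 + cb = Fi / 9 + F / 9 + cb from by ring, pow_add, pow_add]
          exact ((Nat.mod_modEq _ _).mul (Nat.mod_modEq _ _)).mul (Nat.ModEq.refl _)
        rw [← hn]
        exact_mod_cast PySem.Int.mod_natCast
          (10 ^ (Fi / 9) % 1000000007 * (10 ^ (F / 9) % 1000000007) * 10 ^ cb) 1000000007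
      simp only [hcarry, h9, hqn, hxn]
      have hsum : (Fi : Int) + (F : Int) = ((F + Fi : ℕ) : Int) := by push_cast; ring
      rw [hsum, pv_smallest_eq (F + Fi)]
      exact ih n (i + 1) _ Fi (F + Fi) (by omega)
    · rw [pvALoop, pvBLoop, if_neg hin, if_neg hin]

-- ===== VERDICT (by name: the statement is the Claim_ definition above) =====
theorem fibo_smallest_spec : Claim_equal_fibo_smallest := by
  intro n _
  show fibo_smallest n = fibo_smallest_alt n
  unfold fibo_smallest fibo_smallest_alt
  congr 1
  have h := pv_loop_eq (n - 1).toNat n 1 0 0 1 (by omega)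
  norm_num at h
  exact h
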